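-- pv_equiv track=rewrite | github.com/Alce002/PyMENACE | code/menace.py | rotate_move
-- ===== SOURCE A (Python) =====
-- def rotate_move(move, n):
--     if n > 0:
--         x = move[0]-1
--         y = move[1]-1
--         for _ in range(4-n):
--
--             c = x
--             x = y
--             y = -c
--
--         x += 1
--         y += 1
--         return x, y
--     else:
--         return move
-- ===== SOURCE B (Python) =====
-- def rotate_move(move, n):
--     # Closed-form: apply 90-degree steps directly by case on k = 4-n instead of looping.
--     if n <= 0:
--         return move
--     x = move[0] - 1
--     y = move[1] - 1
--     k = 4 - n
--     if k == 1:
--         x, y = y, -x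
--     elif k == 2:
--         x, y = -x, -y
--     elif k == 3:
--         x, y = -y, x
--     return (x + 1, y + 1)
-- ===== Notes on version B (the rewrite author's own statement) =====
-- stated objective: simpler
-- what changed: Replaces the rotation loop over range(4-n) with a closed-form case split on k=4-n (k=1,2,3 give the three nontrivial rotations; any other k leaves the centered point unchanged, matching the empty range for n>=4).
import Mathlib
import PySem

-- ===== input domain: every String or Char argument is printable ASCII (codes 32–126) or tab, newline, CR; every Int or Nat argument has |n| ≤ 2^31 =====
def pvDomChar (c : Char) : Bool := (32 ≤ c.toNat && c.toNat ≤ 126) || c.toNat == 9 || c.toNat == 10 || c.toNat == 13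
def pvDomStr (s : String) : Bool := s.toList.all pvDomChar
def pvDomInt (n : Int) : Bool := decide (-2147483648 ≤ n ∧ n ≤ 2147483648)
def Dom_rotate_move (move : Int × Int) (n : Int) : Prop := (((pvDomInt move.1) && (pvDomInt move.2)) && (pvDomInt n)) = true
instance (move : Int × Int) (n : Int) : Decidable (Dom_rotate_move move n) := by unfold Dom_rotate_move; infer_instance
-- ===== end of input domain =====

-- B replaces the rotation loop over range(4-n) with a closed-form case split on k=4-n (simpler).


-- ===== PORT A =====
-- literal transliteration: center, loop 'for _ in range(4-n)' doing (x,y) := (y,-x), un-center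
def rotate_move (move : Int × Int) (n : Int) : Int × Int :=
  if n > 0 then
    let x := move.1 - 1
    let y := move.2 - 1
    let st := (PySem.List.pyRange 0 (4 - n) 1).foldl (fun (p : Int × Int) _ => (p.2, -p.1)) (x, y)
    (st.1 + 1, st.2 + 1)
  else
    move

-- ===== PORT B =====
-- literal transliteration of Source B: closed-form case split on k = 4 - n
def rotate_move_alt (move : Int × Int) (n : Int) : Int × Int :=
  if n ≤ 0 then
    move
  else
    let x := move.1 - 1
    let y := move.2 - 1
    let k := 4 - n
    let p : Int × Int :=
      if k = 1 then (y, -x)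
      else if k = 2 then (-x, -y)
      else if k = 3 then (-y, x)
      else (x, y)
    (p.1 + 1, p.2 + 1)

-- ===== PRECONDITION & SPEC =====
def Spec_rotate_move (move : Int × Int) (n : Int) (out : Int × Int) : Prop := out = rotate_move_alt move n
instance (move : Int × Int) (n : Int) (out : Int × Int) : Decidable (Spec_rotate_move move n out) := by unfold Spec_rotate_move; infer_instance

-- ===== CLAIM (what is proved, stated in full; the proofs are below) =====
def Claim_equal_rotate_move : Prop := ∀ (move : Int × Int) (n : Int), Dom_rotate_move move n → Spec_rotate_move move n (rotate_move move n)

-- ===== LEMMAS AND PROOFS =====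

-- the loop body applied over an empty range when 4 - n ≤ 0
lemma pyRange_nonpos (b : Int) (h : b ≤ 0) : PySem.List.pyRange 0 b 1 = [] := by
  rw [PySem.List.pyRange_one, (by omega : (b - 0).toNat = 0)]
  simp

-- ===== VERDICT (by name: the statement is the Claim_ definition above) =====
theorem rotate_move_spec : Claim_equal_rotate_move := by
  intro move n _
  unfold Spec_rotate_move rotate_move rotate_move_alt
  rcases lt_or_ge 0 n with hn | hn
  · have hpos : n > 0 := hn
    rcases (by omega : n = 1 ∨ n = 2 ∨ n = 3 ∨ 4 ≤ n) with h1 | h2 | h3 | h4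
    · subst h1; norm_num [show PySem.List.pyRange 0 3 1 = [0, 1, 2] from by decide, List.foldl]
    · subst h2; norm_num [show PySem.List.pyRange 0 2 1 = [0, 1] from by decide, List.foldl]
    · subst h3; norm_num [show PySem.List.pyRange 0 1 1 = [0] from by decide, List.foldl]
    · have he : PySem.List.pyRange 0 (4 - n) 1 = [] := pyRange_nonpos _ (by omega)
      rw [if_pos hpos, if_neg (by omega : ¬ n ≤ 0)]
      simp only [he, List.foldl_nil]
      rw [if_neg (by omega : ¬ (4 - n = 1)), if_neg (by omega : ¬ (4 - n = 2)),
        if_neg (by omega : ¬ (4 - n = 3))]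
  · rw [if_neg (by omega : ¬ n > 0), if_pos (by omega : n ≤ 0)]
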